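-- pv_equiv track=rewrite | github.com/zilohumberto/collect-stock-info | collect_strategies/max.py | process
-- ===== SOURCE A (Python) =====
-- from typing import Any, Sequence, MutableMapping
--
-- def process(api_results: Sequence[MutableMapping[str, Any]]) -> MutableMapping[str, Any]:
--     max_dict = {}
--     for api_result in api_results:
--         for key, value in api_result.items():
--             if key not in max_dict:
--                 max_dict[key] = 0
--
--             max_dict[key] = max(max_dict[key], api_result[key])
--
--     return max_dict
-- ===== SOURCE B (Python) =====
-- def process(api_results):
--     groups = {}
--     for api_result in api_results:
--         for key, value in api_result.items():
--             groups.setdefault(key, []).append(value)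
--     return {key: max(values + [0]) for key, values in groups.items()}
-- ===== Notes on version B (the rewrite author's own statement) =====
-- stated objective: alternative
-- what changed: replaces the single running-max scan with a build-a-grouping-index pass (setdefault/append per key) followed by a reduce pass taking max(values + [0]) per key
import Mathlib
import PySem

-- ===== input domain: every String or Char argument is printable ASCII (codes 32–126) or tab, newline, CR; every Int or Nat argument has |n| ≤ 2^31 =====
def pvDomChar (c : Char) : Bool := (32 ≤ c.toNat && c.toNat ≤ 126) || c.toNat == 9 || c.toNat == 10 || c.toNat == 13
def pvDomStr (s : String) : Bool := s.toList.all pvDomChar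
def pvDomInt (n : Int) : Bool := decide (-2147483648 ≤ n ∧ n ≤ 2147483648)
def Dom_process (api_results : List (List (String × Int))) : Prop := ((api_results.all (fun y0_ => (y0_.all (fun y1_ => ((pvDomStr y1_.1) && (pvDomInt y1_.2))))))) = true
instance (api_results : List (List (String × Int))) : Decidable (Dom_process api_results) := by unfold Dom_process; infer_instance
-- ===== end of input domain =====

-- B builds a per-key grouping index first and reduces each group with max(values + [0]); same result, same cost (objective: alternative).

-- ===== PORT A =====
-- each dict argument is the assoc list read as a Python dict (insertion order, last value wins)
def process (api_results : List (List (String × Int))) : List (String × Int) :=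
  (api_results.foldl
    (fun (md : PySem.Dict String Int) lst =>
      let d := PySem.Dict.ofList lst
      d.items.foldl
        (fun (md : PySem.Dict String Int) kv =>
          let md1 := if md.contains kv.1 then md else md.insert kv.1 0
          md1.insert kv.1 (max (md1.getD kv.1 0) (d.getD kv.1 0)))
        md)
    PySem.Dict.empty).items

-- ===== PORT B =====
def process_alt (api_results : List (List (String × Int))) : List (String × Int) :=
  ((api_results.foldl
    (fun (g : PySem.Dict String (List Int)) lst =>
      (PySem.Dict.ofList lst).items.foldl
        (fun (g : PySem.Dict String (List Int)) kv => g.modify kv.1 [] (· ++ [kv.2])) g)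
    PySem.Dict.empty).items).map
    (fun kv => (kv.1, (PySem.List.max? (kv.2 ++ [(0 : Int)]) (fun y => y)).getD 0))

-- ===== PRECONDITION & SPEC =====
def Spec_process (api_results : List (List (String × Int))) (out : List (String × Int)) : Prop := out = process_alt api_results
instance (api_results : List (List (String × Int))) (out : List (String × Int)) : Decidable (Spec_process api_results out) := by unfold Spec_process; infer_instance

-- ===== CLAIM (what is proved, stated in full; the proofs are below) =====
def Claim_equal_process : Prop := ∀ (api_results : List (List (String × Int))), Dom_process api_results → Spec_process api_results (process api_results)

-- ===== LEMMAS AND PROOFS =====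

-- A's branchy step (init 0 then insert max) is one insert of max over getD-0
theorem stepA_eq (md : PySem.Dict String Int) (k : String) (v : Int) :
    (let md1 := if md.contains k then md else md.insert k 0;
     md1.insert k (max (md1.getD k 0) v)) = md.insert k (max (md.getD k 0) v) := by
  by_cases h : md.contains k = true
  · simp [h]
  · simp only [Bool.not_eq_true] at h
    simp [h, PySem.Dict.getD_insert_self, PySem.Dict.getD_of_not_contains md 0 h,
      PySem.Dict.insert_insert_self]

-- fold of max: pull a max out of the accumulator
theorem foldl_max_acc (t : List Int) : ∀ a b : Int, t.foldl max (max a b) = max (t.foldl max a) b := by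
  induction t with
  | nil => intro a b; rfl
  | cons c t ih =>
    intro a b
    simp only [List.foldl_cons]
    rw [max_right_comm a b c, ih]

-- Python's max(vs + [0]) is the running max with initial 0
theorem mx_eq (vs : List Int) :
    (PySem.List.max? (vs ++ [(0 : Int)]) (fun y => y)).getD 0 = vs.foldl max 0 := by
  cases vs with
  | nil => simp [PySem.List.max?]
  | cons x t =>
    rw [List.cons_append, PySem.List.max?_id_cons]
    simp only [Option.getD_some, List.foldl_cons, List.foldl_append, List.foldl_nil]
    rw [max_comm (0 : Int) x, ← foldl_max_acc]

-- running-max fold characterised by getD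
theorem getD_foldl_insert_max (l : List (String × Int)) :
    ∀ (d : PySem.Dict String Int) (c : String),
    (l.foldl (fun d p => d.insert p.1 (max (d.getD p.1 0) p.2)) d).getD c 0 =
      ((l.filter (fun p => p.1 == c)).map (·.2)).foldl max (d.getD c 0) := by
  induction l with
  | nil => intro d c; rfl
  | cons p l ih =>
    intro d c
    simp only [List.foldl_cons, List.filter_cons]
    by_cases h : p.1 = c
    · subst h
      simp only [BEq.rfl, if_true, List.map_cons, List.foldl_cons]
      rw [ih, PySem.Dict.getD_insert_self]
    · have hb : (p.1 == c) = false := by simp [h]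
      simp only [hb, Bool.false_eq_true, if_false]
      rw [ih, PySem.Dict.getD_insert_of_ne d _ 0 (Ne.symm h)]

-- items of the running-max dict built from a flat pair list
theorem itemsA (L : List (String × Int)) :
    (L.foldl (fun (md : PySem.Dict String Int) kv => md.insert kv.1 (max (md.getD kv.1 0) kv.2))
      PySem.Dict.empty).items =
    (PySem.Set.update ([] : List String) (L.map (·.1))).map
      (fun k => (k, ((L.filter (fun p => p.1 == k)).map (·.2)).foldl max 0)) := by
  have hnd := PySem.Dict.nodup_keys_foldl_insert_key L (·.1)
    (fun md kv => max (md.getD kv.1 0) kv.2) PySem.Dict.empty PySem.Dict.nodup_keys_empty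
  rw [PySem.Dict.items_eq_map_keys _ hnd 0, PySem.Dict.keys_foldl_insert_key,
    PySem.Dict.keys_empty]
  apply List.map_congr_left
  intro k _
  rw [getD_foldl_insert_max, PySem.Dict.getD_empty]

-- items of the grouping dict built from a flat pair list
theorem itemsB (L : List (String × Int)) :
    (L.foldl (fun (g : PySem.Dict String (List Int)) kv => g.modify kv.1 [] (· ++ [kv.2]))
      PySem.Dict.empty).items =
    (PySem.Set.update ([] : List String) (L.map (·.1))).map
      (fun k => (k, (L.filter (fun p => p.1 == k)).map (·.2))) := by
  have hnd := PySem.Dict.nodup_keys_foldl_modify_key L (·.1) []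
    (fun _ kv => (· ++ [kv.2])) PySem.Dict.empty PySem.Dict.nodup_keys_empty
  rw [PySem.Dict.items_eq_map_keys _ hnd [], PySem.Dict.keys_foldl_modify_key,
    PySem.Dict.keys_empty]
  apply List.map_congr_left
  intro k _
  rw [PySem.Dict.getD_foldl_modify_append, PySem.Dict.getD_empty, List.nil_append]

-- A's nested fold over the dicts is the single-insert fold over the flattened items
theorem processA_flat (api_results : List (List (String × Int))) :
    process api_results =
      ((api_results.map (fun lst => (PySem.Dict.ofList lst).items)).flatten.foldl
        (fun (md : PySem.Dict String Int) kv => md.insert kv.1 (max (md.getD kv.1 0) kv.2))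
        PySem.Dict.empty).items := by
  unfold process
  rw [List.foldl_flatten, List.foldl_map]
  congr 1
  apply PySem.List.foldl_congr_mem
  intro md lst _
  apply PySem.List.foldl_congr_mem
  intro md' kv hkv
  obtain ⟨k, v⟩ := kv
  rw [stepA_eq]
  have h := PySem.Dict.getD_of_mem_items _ hkv (PySem.Dict.nodup_keys_ofList lst) 0
  simp [h]

-- B's nested grouping fold is the modify fold over the flattened items
theorem processB_flat (api_results : List (List (String × Int))) :
    api_results.foldl
      (fun (g : PySem.Dict String (List Int)) lst =>
        (PySem.Dict.ofList lst).items.foldl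
          (fun (g : PySem.Dict String (List Int)) kv => g.modify kv.1 [] (· ++ [kv.2])) g)
      PySem.Dict.empty =
    (api_results.map (fun lst => (PySem.Dict.ofList lst).items)).flatten.foldl
      (fun (g : PySem.Dict String (List Int)) kv => g.modify kv.1 [] (· ++ [kv.2]))
      PySem.Dict.empty := by
  rw [List.foldl_flatten, List.foldl_map]

-- ===== VERDICT (by name: the statement is the Claim_ definition above) =====
theorem process_spec : Claim_equal_process := by
  intro api_results _
  unfold Spec_process process_alt
  rw [processB_flat, processA_flat, itemsA, itemsB, List.map_map]
  apply List.map_congr_left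
  intro k _
  simp only [Function.comp]
  rw [mx_eq]
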